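-- pv_equiv track=rewrite | github.com/kishoreUdatha/BharatBuild_AI | backend/app/modules/automation/uml_generator.py | _detect_cache_storage
-- ===== SOURCE A (Python) =====
-- from typing import Dict, List, Optional, Any
--
-- def _detect_cache_storage(project_data: Dict) -> List[str]:
--     """Detect cache and storage solutions from project data."""
--     features_str = ' '.join(str(f).lower() for f in project_data.get('features', []))
--
--     cache_storage = []
--
--     # Cache
--     if 'redis' in features_str:
--         cache_storage.append('Redis Cache')
--     elif 'memcached' in features_str:
--         cache_storage.append('Memcached')
--     elif any(kw in features_str for kw in ['cache', 'session', 'realtime']):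
--         cache_storage.append('In-Memory Cache')
--
--     # File storage
--     if 's3' in features_str or 'aws' in features_str:
--         cache_storage.append('AWS S3 Storage')
--     elif 'gcs' in features_str or 'google cloud' in features_str:
--         cache_storage.append('Google Cloud Storage')
--     elif 'azure' in features_str:
--         cache_storage.append('Azure Blob Storage')
--     elif 'cloudinary' in features_str:
--         cache_storage.append('Cloudinary')
--     elif any(kw in features_str for kw in ['upload', 'file', 'image', 'media']):
--         cache_storage.append('File Storage')
--
--     if not cache_storage:
--         cache_storage = ['Local Storage', 'Session Storage']
--
--     return cache_storage[:2]
-- ===== SOURCE B (Python) =====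
-- # Keyword-indexed re-implementation: a flat keyword -> (group, priority, label) map,
-- # one pass over the keywords keeping the minimum-priority hit per group.
-- KEYWORD_MAP = {
--     'redis':        (0, 0, 'Redis Cache'),
--     'memcached':    (0, 1, 'Memcached'),
--     'cache':        (0, 2, 'In-Memory Cache'),
--     'session':      (0, 2, 'In-Memory Cache'),
--     'realtime':     (0, 2, 'In-Memory Cache'),
--     's3':           (1, 0, 'AWS S3 Storage'),
--     'aws':          (1, 0, 'AWS S3 Storage'),
--     'gcs':          (1, 1, 'Google Cloud Storage'),
--     'google cloud': (1, 1, 'Google Cloud Storage'),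
--     'azure':        (1, 2, 'Azure Blob Storage'),
--     'cloudinary':   (1, 3, 'Cloudinary'),
--     'upload':       (1, 4, 'File Storage'),
--     'file':         (1, 4, 'File Storage'),
--     'image':        (1, 4, 'File Storage'),
--     'media':        (1, 4, 'File Storage'),
-- }
--
--
-- def _detect_cache_storage(project_data):
--     features_str = ' '.join(str(f).lower() for f in project_data.get('features', []))
--     best = {}  # group -> (priority, label)
--     for kw, (group, prio, label) in KEYWORD_MAP.items():
--         if kw in features_str and (group not in best or prio < best[group][0]):
--             best[group] = (prio, label)
--     result = [best[g][1] for g in (0, 1) if g in best]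
--     return result or ['Local Storage', 'Session Storage']
-- ===== Notes on version B (the rewrite author's own statement) =====
-- stated objective: alternative
-- what changed: Replaced the two short-circuiting if/elif chains by a flat keyword->(group,priority,label) map scanned in one pass, keeping the minimum-priority hit per group (a min-reduction instead of ordered first-match branches); the fallback stays and [:2] is dropped since each group yields at most one label.
import Mathlib
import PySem

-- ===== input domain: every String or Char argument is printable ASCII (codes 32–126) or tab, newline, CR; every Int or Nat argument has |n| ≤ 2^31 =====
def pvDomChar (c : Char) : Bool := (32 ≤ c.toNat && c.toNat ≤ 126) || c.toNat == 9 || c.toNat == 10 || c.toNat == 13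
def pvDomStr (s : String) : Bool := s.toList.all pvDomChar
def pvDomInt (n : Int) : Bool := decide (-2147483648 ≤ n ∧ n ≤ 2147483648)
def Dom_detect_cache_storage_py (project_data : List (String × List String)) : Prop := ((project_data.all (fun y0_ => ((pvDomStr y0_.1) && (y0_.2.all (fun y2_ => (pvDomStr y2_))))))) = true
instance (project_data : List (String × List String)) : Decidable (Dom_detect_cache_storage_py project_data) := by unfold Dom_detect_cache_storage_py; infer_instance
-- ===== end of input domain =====

-- B replaces the if/elif chains by a flat keyword map scanned once with a min-priority-per-group reduction; return value only.

-- ===== PORT A =====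
-- A's body after computing features_str: sequential if/elif chains appending to cache_storage,
-- empty fallback, then [:2].
def pyCoreA (fs : String) : List String :=
  let cs : List String := []
  let cs := if PySem.Str.isIn "redis" fs then cs ++ ["Redis Cache"]
            else if PySem.Str.isIn "memcached" fs then cs ++ ["Memcached"]
            else if (["cache", "session", "realtime"].any fun kw => PySem.Str.isIn kw fs) then
              cs ++ ["In-Memory Cache"]
            else cs
  let cs := if PySem.Str.isIn "s3" fs || PySem.Str.isIn "aws" fs then cs ++ ["AWS S3 Storage"]
            else if PySem.Str.isIn "gcs" fs || PySem.Str.isIn "google cloud" fs then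
              cs ++ ["Google Cloud Storage"]
            else if PySem.Str.isIn "azure" fs then cs ++ ["Azure Blob Storage"]
            else if PySem.Str.isIn "cloudinary" fs then cs ++ ["Cloudinary"]
            else if (["upload", "file", "image", "media"].any fun kw => PySem.Str.isIn kw fs) then
              cs ++ ["File Storage"]
            else cs
  let cs := if cs = [] then ["Local Storage", "Session Storage"] else cs
  PySem.List.slice cs none (some 2)

def detect_cache_storage_py (project_data : List (String × List String)) : List String :=
  pyCoreA (PySem.Str.join " "
    (((PySem.Dict.mk project_data).getD "features" []).map fun f => PySem.Str.lower f))

-- ===== PORT B =====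
-- Source B's KEYWORD_MAP, in insertion order: (keyword, (group, priority, label))
def keywordMap : List (String × Nat × Nat × String) :=
  [("redis", 0, 0, "Redis Cache"),
   ("memcached", 0, 1, "Memcached"),
   ("cache", 0, 2, "In-Memory Cache"),
   ("session", 0, 2, "In-Memory Cache"),
   ("realtime", 0, 2, "In-Memory Cache"),
   ("s3", 1, 0, "AWS S3 Storage"),
   ("aws", 1, 0, "AWS S3 Storage"),
   ("gcs", 1, 1, "Google Cloud Storage"),
   ("google cloud", 1, 1, "Google Cloud Storage"),
   ("azure", 1, 2, "Azure Blob Storage"),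
   ("cloudinary", 1, 3, "Cloudinary"),
   ("upload", 1, 4, "File Storage"),
   ("file", 1, 4, "File Storage"),
   ("image", 1, 4, "File Storage"),
   ("media", 1, 4, "File Storage")]

-- Source B's loop: best is a dict group -> (priority, label), updated when the keyword
-- occurs and the rule has strictly smaller priority than the stored one.
def altCoreB (fs : String) : List String :=
  let best : PySem.Dict Nat (Nat × String) :=
    keywordMap.foldl
      (fun best e =>
        if PySem.Str.isIn e.1 fs &&
           (match best.get? e.2.1 with
            | none => true
            | some pl => e.2.2.1 < pl.1) then
          best.insert e.2.1 (e.2.2.1, e.2.2.2)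
        else best)
      (PySem.Dict.mk [])
  let result := ([0, 1] : List Nat).filterMap fun g => (best.get? g).map (·.2)
  if result = [] then ["Local Storage", "Session Storage"] else result

def detect_cache_storage_py_alt (project_data : List (String × List String)) : List String :=
  altCoreB (PySem.Str.join " "
    (((PySem.Dict.mk project_data).getD "features" []).map fun f => PySem.Str.lower f))

-- ===== PRECONDITION & SPEC =====
def Spec_detect_cache_storage_py (project_data : List (String × List String)) (out : List String) : Prop := out = detect_cache_storage_py_alt project_data
instance (project_data : List (String × List String)) (out : List String) : Decidable (Spec_detect_cache_storage_py project_data out) := by unfold Spec_detect_cache_storage_py; infer_instance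

-- ===== CLAIM (what is proved, stated in full; the proofs are below) =====
def Claim_equal_detect_cache_storage_py : Prop := ∀ (project_data : List (String × List String)), Dom_detect_cache_storage_py project_data → Spec_detect_cache_storage_py project_data (detect_cache_storage_py project_data)

-- ===== LEMMAS AND PROOFS =====

-- pyCoreA with the 15 substring tests abstracted into booleans (definitional image of pyCoreA)
def pyA' (b1 b2 b3 b4 b5 b6 b7 b8 b9 b10 b11 b12 b13 b14 b15 : Bool) : List String :=
  let cs : List String := []
  let cs := if b1 then cs ++ ["Redis Cache"]
            else if b2 then cs ++ ["Memcached"]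
            else if (b3 || (b4 || (b5 || false))) then cs ++ ["In-Memory Cache"]
            else cs
  let cs := if b6 || b7 then cs ++ ["AWS S3 Storage"]
            else if b8 || b9 then cs ++ ["Google Cloud Storage"]
            else if b10 then cs ++ ["Azure Blob Storage"]
            else if b11 then cs ++ ["Cloudinary"]
            else if (b12 || (b13 || (b14 || (b15 || false)))) then cs ++ ["File Storage"]
            else cs
  let cs := if cs = [] then ["Local Storage", "Session Storage"] else cs
  PySem.List.slice cs none (some 2)

-- altCoreB with the same tests abstracted (definitional image of altCoreB)
def altB' (b1 b2 b3 b4 b5 b6 b7 b8 b9 b10 b11 b12 b13 b14 b15 : Bool) : List String :=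
  let best : PySem.Dict Nat (Nat × String) :=
    ([(b1, 0, 0, "Redis Cache"),
      (b2, 0, 1, "Memcached"),
      (b3, 0, 2, "In-Memory Cache"),
      (b4, 0, 2, "In-Memory Cache"),
      (b5, 0, 2, "In-Memory Cache"),
      (b6, 1, 0, "AWS S3 Storage"),
      (b7, 1, 0, "AWS S3 Storage"),
      (b8, 1, 1, "Google Cloud Storage"),
      (b9, 1, 1, "Google Cloud Storage"),
      (b10, 1, 2, "Azure Blob Storage"),
      (b11, 1, 3, "Cloudinary"),
      (b12, 1, 4, "File Storage"),
      (b13, 1, 4, "File Storage"),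
      (b14, 1, 4, "File Storage"),
      (b15, 1, 4, "File Storage")] : List (Bool × Nat × Nat × String)).foldl
      (fun best e =>
        if e.1 &&
           (match best.get? e.2.1 with
            | none => true
            | some pl => e.2.2.1 < pl.1) then
          best.insert e.2.1 (e.2.2.1, e.2.2.2)
        else best)
      (PySem.Dict.mk [])
  let result := ([0, 1] : List Nat).filterMap fun g => (best.get? g).map (·.2)
  if result = [] then ["Local Storage", "Session Storage"] else result

set_option maxHeartbeats 4000000 in
lemma pv_core_bools_eq : ∀ b1 b2 b3 b4 b5 b6 b7 b8 b9 b10 b11 b12 b13 b14 b15 : Bool,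
    pyA' b1 b2 b3 b4 b5 b6 b7 b8 b9 b10 b11 b12 b13 b14 b15 =
    altB' b1 b2 b3 b4 b5 b6 b7 b8 b9 b10 b11 b12 b13 b14 b15 := by decide

set_option maxHeartbeats 4000000 in
lemma pyA_abs (fs : String) :
    pyCoreA fs = pyA' (PySem.Str.isIn "redis" fs) (PySem.Str.isIn "memcached" fs)
      (PySem.Str.isIn "cache" fs) (PySem.Str.isIn "session" fs) (PySem.Str.isIn "realtime" fs)
      (PySem.Str.isIn "s3" fs) (PySem.Str.isIn "aws" fs) (PySem.Str.isIn "gcs" fs)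
      (PySem.Str.isIn "google cloud" fs) (PySem.Str.isIn "azure" fs)
      (PySem.Str.isIn "cloudinary" fs) (PySem.Str.isIn "upload" fs) (PySem.Str.isIn "file" fs)
      (PySem.Str.isIn "image" fs) (PySem.Str.isIn "media" fs) := rfl

set_option maxHeartbeats 4000000 in
lemma altB_abs (fs : String) :
    altCoreB fs = altB' (PySem.Str.isIn "redis" fs) (PySem.Str.isIn "memcached" fs)
      (PySem.Str.isIn "cache" fs) (PySem.Str.isIn "session" fs) (PySem.Str.isIn "realtime" fs)
      (PySem.Str.isIn "s3" fs) (PySem.Str.isIn "aws" fs) (PySem.Str.isIn "gcs" fs)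
      (PySem.Str.isIn "google cloud" fs) (PySem.Str.isIn "azure" fs)
      (PySem.Str.isIn "cloudinary" fs) (PySem.Str.isIn "upload" fs) (PySem.Str.isIn "file" fs)
      (PySem.Str.isIn "image" fs) (PySem.Str.isIn "media" fs) := rfl

lemma core_eq (fs : String) : pyCoreA fs = altCoreB fs := by
  rw [pyA_abs, altB_abs]; exact pv_core_bools_eq _ _ _ _ _ _ _ _ _ _ _ _ _ _ _

-- ===== VERDICT (by name: the statement is the Claim_ definition above) =====
theorem detect_cache_storage_py_spec : Claim_equal_detect_cache_storage_py := by
  intro pd _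
  unfold Spec_detect_cache_storage_py detect_cache_storage_py detect_cache_storage_py_alt
  exact core_eq _
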